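-- pv_equiv track=rewrite | github.com/Nazyli/DDP-TI08-Lab-8 | main.py | urut_unik
-- ===== SOURCE A (Python) =====
-- def urut_unik(s):
--   # Tulis kode fungsi urut_unik() di bawah ini
--   # Hapus pass jika implementasi sudah dibuat
--   # membuat set kosong agar data unik
--   x = set()
--   # melakukan looping string s list
--   for i in s.split():
--     # menambahkan data ke set
--     x.add(i)
--   # membuat list kosong
--   ls = []
--   # melakukan looping set
--   for j in x:
--     # menambahan data set ke data list
--     ls.append(j)
--   # mengurutkan list
--   ls.sort()
--   # mengembalikan nilai
--   return ls
-- ===== SOURCE B (Python) =====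
-- def urut_unik(s):
--     # sort all words first, then deduplicate by adjacency (no set maintained)
--     out = []
--     for w in sorted(s.split()):
--         if not out or out[-1] != w:
--             out.append(w)
--     return out
-- ===== Notes on version B (the rewrite author's own statement) =====
-- stated objective: alternative
-- what changed: B sorts the full word list (duplicates included) and deduplicates by a single adjacency scan over the sorted list, instead of building a set first and sorting its elements.
import Mathlib
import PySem

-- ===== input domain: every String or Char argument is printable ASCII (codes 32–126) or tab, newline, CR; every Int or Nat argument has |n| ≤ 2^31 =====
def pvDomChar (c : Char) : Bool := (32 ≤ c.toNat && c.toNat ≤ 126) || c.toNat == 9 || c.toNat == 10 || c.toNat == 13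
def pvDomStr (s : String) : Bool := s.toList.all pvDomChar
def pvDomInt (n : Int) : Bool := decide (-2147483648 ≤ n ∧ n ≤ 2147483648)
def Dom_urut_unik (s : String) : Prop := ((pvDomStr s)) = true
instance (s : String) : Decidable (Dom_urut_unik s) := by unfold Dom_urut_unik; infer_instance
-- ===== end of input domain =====

-- B replaces A's set-then-sort by sort-then-adjacency-dedup; same result, no set maintained.

-- ===== PORT A =====
-- A iterates over a Python set to copy it into a list and then sorts that list;
-- the copy loop is ported as a fold over the Set's element list (hash order is not
-- modelled, but the subsequent identity-key sort of the distinct elements makes the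
-- result independent of that iteration order).
def urut_unik (s : String) : List String :=
  let x : PySem.Set String := (PySem.Str.split₀ s).foldl PySem.Set.add PySem.Set.empty
  let ls : List String := x.foldl (fun acc j => acc ++ [j]) []
  PySem.List.sorted ls (fun w => w) false

-- ===== PORT B =====
def urut_unik_alt (s : String) : List String :=
  (PySem.List.sorted (PySem.Str.split₀ s) (fun w => w) false).foldl
    (fun out w =>
      if out = [] ∨ out.getLast? ≠ some w then out ++ [w] else out) []

-- ===== PRECONDITION & SPEC =====
def Spec_urut_unik (s : String) (out : List String) : Prop := out = urut_unik_alt s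
instance (s : String) (out : List String) : Decidable (Spec_urut_unik s out) := by unfold Spec_urut_unik; infer_instance

-- ===== CLAIM (what is proved, stated in full; the proofs are below) =====
def Claim_equal_urut_unik : Prop := ∀ (s : String), Dom_urut_unik s → Spec_urut_unik s (urut_unik s)

-- ===== LEMMAS AND PROOFS =====

-- elements of a strictly increasing list are ≤ its last element
theorem pv_le_getLast {l : List String} {p : String}
    (hp : l.Pairwise (· < ·)) (hl : l.getLast? = some p) : ∀ x ∈ l, x ≤ p := by
  induction l with
  | nil => simp at hl
  | cons a t ih =>
    rcases List.pairwise_cons.mp hp with ⟨ha, hpt⟩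
    cases t with
    | nil =>
      simp at hl; subst hl; intro x hx; simp at hx; simp [hx]
    | cons b u =>
      have hl' : (b :: u).getLast? = some p := by
        simpa [List.getLast?_cons_cons] using hl
      intro x hx
      rcases List.mem_cons.mp hx with rfl | hx'
      · exact le_of_lt (lt_of_lt_of_le (ha b (by simp))
          (ih hpt hl' b (by simp)))
      · exact ih hpt hl' x hx'

def pvStep (out : List String) (w : String) : List String :=
  if out = [] ∨ out.getLast? ≠ some w then out ++ [w] else out

-- fold invariant: starting from acc strictly increasing whose last bounds t below,
-- the fold stays strictly increasing and has exactly the members of acc and t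
theorem pv_fold_inv (t : List String) :
    ∀ acc : List String, t.Pairwise (· ≤ ·) → acc.Pairwise (· < ·) →
    (∀ p, acc.getLast? = some p → ∀ y ∈ t, p ≤ y) →
    (t.foldl pvStep acc).Pairwise (· < ·) ∧
    (∀ x, x ∈ t.foldl pvStep acc ↔ x ∈ acc ∨ x ∈ t) := by
  induction t with
  | nil => intro acc _ hacc _; simpa using hacc
  | cons w t ih =>
    intro acc ht hacc hbound
    rcases List.pairwise_cons.mp ht with ⟨hwle, ht'⟩
    by_cases hc : acc = [] ∨ acc.getLast? ≠ some w
    · -- append branch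
      have hstep : pvStep acc w = acc ++ [w] := by simp [pvStep, hc]
      have halllt : ∀ x ∈ acc, x < w := by
        intro x hx
        rcases hne : acc.getLast? with _ | p
        · simp [List.getLast?_eq_none_iff] at hne; simp [hne] at hx
        · have hxp : x ≤ p := pv_le_getLast hacc hne x hx
          have hpw : p ≤ w := hbound p hne w (by simp)
          have hpnw : p ≠ w := by
            rcases hc with hnil | hne'
            · simp [hnil] at hne
            · intro h; exact hne' (by simp [hne, h])
          exact lt_of_le_of_lt hxp (lt_of_le_of_ne hpw hpnw)
      have hacc' : (acc ++ [w]).Pairwise (· < ·) := by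
        refine List.pairwise_append.mpr ⟨hacc, by simp, ?_⟩
        intro x hx y hy; simp at hy; subst hy; exact halllt x hx
      have hbound' : ∀ p, (acc ++ [w]).getLast? = some p → ∀ y ∈ t, p ≤ y := by
        intro p hp y hy
        simp [List.getLast?_append] at hp
        subst hp; exact hwle y hy
      have := ih (acc ++ [w]) ht' hacc' hbound'
      refine ⟨by simpa [hstep] using this.1, ?_⟩
      intro x
      have := this.2 x
      simp only [List.foldl_cons, hstep] at *
      rw [this]; simp; tauto
    · -- skip branch: acc.getLast? = some w, so w ∈ acc
      rw [not_or, not_not] at hc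
      have hstep : pvStep acc w = acc := by simp [pvStep, hc.1, hc.2]
      have hwmem : w ∈ acc := by
        obtain ⟨hne, heq⟩ := List.mem_getLast?_eq_getLast (l := acc) (x := w) (by simp [hc.2])
        exact heq ▸ List.getLast_mem hne
      have hbound' : ∀ p, acc.getLast? = some p → ∀ y ∈ t, p ≤ y := by
        intro p hp y hy
        rw [hc.2] at hp
        cases hp; exact hwle y hy
      have := ih acc ht' hacc hbound'
      refine ⟨by simpa [hstep] using this.1, ?_⟩
      intro x
      have h2 := this.2 x
      simp only [List.foldl_cons, hstep] at *
      rw [h2]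
      constructor
      · tauto
      · rintro (h | h)
        · exact Or.inl h
        · rcases List.mem_cons.mp h with rfl | h'
          · exact Or.inl hwmem
          · exact Or.inr h'
-- copying a list element by element is the identity
theorem pv_foldl_append (l : List String) :
    ∀ acc : List String, l.foldl (fun a j => a ++ [j]) acc = acc ++ l := by
  induction l with
  | nil => simp
  | cons a t ih => intro acc; simp [ih]

-- ===== VERDICT (by name: the statement is the Claim_ definition above) =====
theorem urut_unik_spec : Claim_equal_urut_unik := by
  intro s _
  unfold Spec_urut_unik urut_unik urut_unik_alt
  set ws := PySem.Str.split₀ s with hws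
  -- A's set is Set.ofList ws, and the copy loop returns it unchanged
  have hx : ws.foldl PySem.Set.add PySem.Set.empty = PySem.Set.ofList ws := by
    rw [PySem.Set.ofList_eq_foldl]; rfl
  have hcopy : (PySem.Set.ofList ws).foldl (fun acc j => acc ++ [j]) ([] : List String)
      = PySem.Set.ofList ws := by
    simpa using pv_foldl_append (PySem.Set.ofList ws) []
  simp only [hx, hcopy]
  -- B's output: strictly increasing, same members as ws
  have hsorted : (PySem.List.sorted ws (fun w => w) false).Pairwise (· ≤ ·) := by
    simpa using PySem.List.sorted_pairwise ws (fun w => w)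
  obtain ⟨hlt, hmem⟩ :=
    pv_fold_inv (PySem.List.sorted ws (fun w => w) false) [] hsorted (by simp) (by simp)
  set out := (PySem.List.sorted ws (fun w => w) false).foldl pvStep []
  -- out is a permutation of Set.ofList ws (both nodup, same members)
  have hperm : out.Perm (PySem.Set.ofList ws) := by
    refine (List.perm_ext_iff_of_nodup hlt.nodup (PySem.Set.nodup_ofList ws)).mpr ?_
    intro x
    rw [PySem.Set.mem_ofList]
    have := hmem x
    simp only [List.mem_nil_iff, false_or] at this
    rw [this, PySem.List.mem_sorted]
  have := PySem.List.sorted_eq_of_perm_of_pairwise_lt (xs := PySem.Set.ofList ws)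
      (ys := out) (key := fun w => w) hperm (by simpa using hlt)
  rw [this]
  rfl
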